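-- pv_equiv track=rewrite | github.com/gabriel-briffe/airspace | 40-make_openair.py | format_airspace_name
-- ===== SOURCE A (Python) =====
-- def format_airspace_name(name):
--     """Format airspace name to match standard format.
--     Example: 'LF R 108 A F3 ISTRES' -> 'LF-R108AF3 ISTRES'"""
--     parts = name.split()
--
--     # Handle empty name
--     if not parts:
--         return name
--
--     # Initialize result and buffer
--     result = []
--     buffer = []
--
--     # Handle LF prefix only if it's not already in the format we want
--     if parts[0] == "LF" and len(parts) > 1 and parts[1] != "-":
--         buffer.append("LF-")
--         parts = parts[1:]  # Remove LF from parts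
--     elif parts[0] == "LF-":
--         buffer.append("LF-")
--         parts = parts[1:]  # Remove LF- from parts
--
--     # Process remaining parts
--     found_main_word = False
--
--     for part in parts:
--         if not found_main_word:
--             # Check if it's a main word (3+ letters and not a number)
--             is_main_word = len(part) >= 3 and not any(c.isdigit() for c in part)
--
--             if is_main_word:
--                 # Add buffer contents and this part with a space
--                 prefix = buffer[0] + ''.join(buffer[1:]) if buffer else ''
--                 result.append(f"{prefix} {part}")
--                 buffer = []
--                 found_main_word = True
--             else:
--                 buffer.append(part)
--         else:
--             # After main word, keep original spacing
--             result.append(part)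
--
--     # If we never found a main word, join everything
--     if not found_main_word and buffer:
--         result.append(''.join(buffer))
--
--     # Join with spaces and remove any double spaces
--     return ' '.join(result).strip()
-- ===== SOURCE B (Python) =====
-- def format_airspace_name(name):
--     """Format airspace name to match standard format.
--     Single right-to-left pass: fold tokens from the end, maintaining the
--     formatted suffix and the plain space-joined suffix; no search index,
--     no found-main-word flag."""
--     tokens = name.split()
--     if not tokens:
--         return name
--     prefix = ''
--     if (tokens[0] == "LF" and len(tokens) > 1 and tokens[1] != "-") or tokens[0] == "LF-":
--         prefix = "LF-"
--         tokens = tokens[1:]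
--     fmt = ''   # formatted rendering of the suffix processed so far
--     sp = ''    # plain space-join of that suffix
--     for t in reversed(tokens):
--         if len(t) >= 3 and not any(c.isdigit() for c in t):
--             # t is the (currently) first main word: space before it, plain join after
--             fmt = ' ' + t + ((' ' + sp) if sp else '')
--         else:
--             # non-main token glues onto the front with no space
--             fmt = t + fmt
--         sp = t + ((' ' + sp) if sp else '')
--     return (prefix + fmt).strip()
-- ===== Notes on version B (the rewrite author's own statement) =====
-- stated objective: alternative
-- what changed: Replaces A's left-to-right result/buffer/found_main_word state machine with a single right-to-left fold over the tokens that maintains two strings (the formatted suffix and the plain space-joined suffix), so there is no buffer, no search for a split index and no found flag.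
import Mathlib
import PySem

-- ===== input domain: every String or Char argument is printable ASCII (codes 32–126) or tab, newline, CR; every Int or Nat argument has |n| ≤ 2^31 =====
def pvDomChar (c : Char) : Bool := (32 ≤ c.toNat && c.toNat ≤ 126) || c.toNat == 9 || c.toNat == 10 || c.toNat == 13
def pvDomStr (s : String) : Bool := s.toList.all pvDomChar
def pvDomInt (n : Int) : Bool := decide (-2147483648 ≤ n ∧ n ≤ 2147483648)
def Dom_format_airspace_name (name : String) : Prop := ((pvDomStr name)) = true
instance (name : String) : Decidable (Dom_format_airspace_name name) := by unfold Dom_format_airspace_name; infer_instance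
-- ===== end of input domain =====

-- B replaces A's left-to-right result/buffer/found_main_word state machine with a single
-- right-to-left fold maintaining the formatted suffix and the plain space-joined suffix
-- (objective: alternative); return values proved equal on all inputs.


-- ===== PORT A =====
-- is_main_word = len(part) >= 3 and not any(c.isdigit() for c in part)
def pvIsMainA (part : List Char) : Bool :=
  decide (3 ≤ part.length) && !(part.any PySem.Chars.isdigit)

-- one iteration of A's for-loop; state = (result, buffer, found_main_word)
def pvStepA (st : List (List Char) × List (List Char) × Bool) (part : List Char) :
    List (List Char) × List (List Char) × Bool :=
  if st.2.2 = false then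
    if pvIsMainA part then
      -- prefix = buffer[0] + ''.join(buffer[1:]) if buffer else ''
      let pre := if st.2.1 ≠ [] then st.2.1.head! ++ PySem.Chars.join [] st.2.1.tail else []
      (st.1 ++ [pre ++ ' ' :: part], [], true)
    else
      (st.1, st.2.1 ++ [part], false)
  else
    (st.1 ++ [part], st.2.1, st.2.2)

def format_airspace_name (name : String) : String :=
  let parts := PySem.Chars.split₀ name.toList
  if parts = [] then name
  else
    let pb :=
      if parts.head! = ['L','F'] ∧ 1 < parts.length ∧ parts[1]! ≠ ['-'] then
        (parts.tail, [['L','F','-']])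
      else if parts.head! = ['L','F','-'] then
        (parts.tail, [['L','F','-']])
      else (parts, ([] : List (List Char)))
    let st := pb.1.foldl pvStepA ([], pb.2, false)
    -- if not found_main_word and buffer: result.append(''.join(buffer))
    let result := if st.2.2 = false ∧ st.2.1 ≠ [] then st.1 ++ [PySem.Chars.join [] st.2.1] else st.1
    String.ofList (PySem.Chars.strip (PySem.Chars.join [' '] result))

-- ===== PORT B =====
-- one iteration of B's reversed loop; state = (fmt, sp);
-- the inline condition is len(t) >= 3 and not any(c.isdigit() for c in t)
def pvStepB (st : List Char × List Char) (t : List Char) : List Char × List Char :=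
  ( if decide (3 ≤ t.length) && !(t.any PySem.Chars.isdigit) then ' ' :: (t ++ (if st.2 ≠ [] then ' ' :: st.2 else []))
    else t ++ st.1,
    t ++ (if st.2 ≠ [] then ' ' :: st.2 else []) )

def format_airspace_name_alt (name : String) : String :=
  let tokens := PySem.Chars.split₀ name.toList
  if tokens = [] then name
  else
    let pt :=
      if (tokens.head! = ['L','F'] ∧ 1 < tokens.length ∧ tokens[1]! ≠ ['-']) ∨
         tokens.head! = ['L','F','-'] then
        (['L','F','-'], tokens.tail)
      else (([] : List Char), tokens)
    -- for t in reversed(tokens): …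
    let st := pt.2.reverse.foldl pvStepB ([], [])
    String.ofList (PySem.Chars.strip (pt.1 ++ st.1))

-- ===== PRECONDITION & SPEC =====
def Spec_format_airspace_name (name : String) (out : String) : Prop := out = format_airspace_name_alt name
instance (name : String) (out : String) : Decidable (Spec_format_airspace_name name out) := by unfold Spec_format_airspace_name; infer_instance

-- ===== CLAIM (what is proved, stated in full; the proofs are below) =====
def Claim_equal_format_airspace_name : Prop := ∀ (name : String), Dom_format_airspace_name name → Spec_format_airspace_name name (format_airspace_name name)

-- ===== LEMMAS AND PROOFS =====

-- the common shape both ports reduce to: the formatted token list (no prefix, no strip)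
def pvFmt (ts : List (List Char)) : List Char :=
  match ts.findIdx? pvIsMainA with
  | none => ts.flatten
  | some i =>
      (ts.take i).flatten ++ ' ' :: ts[i]! ++
        (if ts.drop (i + 1) ≠ [] then ' ' :: PySem.Chars.join [' '] (ts.drop (i + 1)) else [])

theorem pvJoin_nil_eq (L : List (List Char)) : PySem.Chars.join [] L = L.flatten := by
  induction L with
  | nil => rfl
  | cons a l ih =>
    cases l with
    | nil => simp [PySem.Chars.join_singleton]
    | cons b l' =>
      rw [PySem.Chars.join_cons_cons] at *
      simp [List.flatten] at *
      simpa using ih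

theorem pvJoinPrefix_eq (b : List (List Char)) :
    (if b ≠ [] then b.head! ++ PySem.Chars.join [] b.tail else []) = PySem.Chars.join [] b := by
  cases b with
  | nil => simp [PySem.Chars.join_nil]
  | cons a l => simp [pvJoin_nil_eq, List.flatten]

theorem pvFoldA_found (ts : List (List Char)) (res buf : List (List Char)) :
    ts.foldl pvStepA (res, buf, true) = (res ++ ts, buf, true) := by
  induction ts generalizing res with
  | nil => simp
  | cons t ts ih => simp [List.foldl_cons, pvStepA, ih]

theorem pvFoldA_notfound (ts : List (List Char)) (res b : List (List Char)) :
    ts.foldl pvStepA (res, b, false) =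
      match ts.findIdx? pvIsMainA with
      | none => (res, b ++ ts, false)
      | some i =>
          (res ++ [PySem.Chars.join [] (b ++ ts.take i) ++ ' ' :: ts[i]!] ++ ts.drop (i + 1),
            [], true) := by
  induction ts generalizing res b with
  | nil => simp
  | cons t ts ih =>
    rw [List.foldl_cons]
    by_cases h : pvIsMainA t
    · have hstep : pvStepA (res, b, false) t =
          (res ++ [PySem.Chars.join [] b ++ ' ' :: t], [], true) := by
        simp [pvStepA, h, ← pvJoinPrefix_eq b]
      rw [hstep, pvFoldA_found, List.findIdx?_cons, if_pos h]
      simp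
    · have hstep : pvStepA (res, b, false) t = (res, b ++ [t], false) := by
        simp [pvStepA, h]
      rw [hstep, ih, List.findIdx?_cons, if_neg h]
      cases hf : ts.findIdx? pvIsMainA with
      | none => simp
      | some j => simp

-- A's tail value rewritten through pvFmt
theorem pvA_eq (b ts : List (List Char)) :
    (let st := ts.foldl pvStepA ([], b, false)
     let result := if st.2.2 = false ∧ st.2.1 ≠ [] then st.1 ++ [PySem.Chars.join [] st.2.1] else st.1
     PySem.Chars.strip (PySem.Chars.join [' '] result)) =
    PySem.Chars.strip (b.flatten ++ pvFmt ts) := by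
  rw [pvFoldA_notfound, pvFmt]
  cases hf : ts.findIdx? pvIsMainA with
  | none =>
    dsimp only
    by_cases hbe : b ++ ts = []
    · rcases List.append_eq_nil_iff.mp hbe with ⟨hb, ht⟩
      simp [hb, ht, PySem.Chars.join_nil]
    · rw [if_pos (And.intro rfl hbe), List.nil_append, PySem.Chars.join_singleton,
        pvJoin_nil_eq, List.flatten_append]
  | some i =>
    dsimp only
    rw [if_neg (by simp)]
    cases hd : ts.drop (i + 1) with
    | nil =>
      simp [PySem.Chars.join_singleton, pvJoin_nil_eq, List.flatten_append]
    | cons d ds =>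
      rw [List.nil_append, List.singleton_append, PySem.Chars.join_cons_cons]
      simp [pvJoin_nil_eq, List.flatten_append, List.append_assoc]

-- characterization of B's right-to-left fold (tokens nonempty)
theorem pvJoin_sp_ne (l : List (List Char)) (hne : ∀ t ∈ l, t ≠ []) :
    (PySem.Chars.join [' '] l ≠ []) ↔ l ≠ [] := by
  cases l with
  | nil => simp [PySem.Chars.join_nil]
  | cons a l' =>
    cases l' with
    | nil =>
      simp only [PySem.Chars.join_singleton]
      simpa using hne a (by simp)
    | cons b l'' =>
      rw [PySem.Chars.join_cons_cons]
      have : a ≠ [] := hne a (by simp)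
      constructor
      · intro _; simp
      · intro _ h
        exact this (List.append_eq_nil_iff.mp (List.append_eq_nil_iff.mp h).1).1

theorem pvFmt_cons_main (t : List Char) (rest : List (List Char)) (h : pvIsMainA t = true) :
    pvFmt (t :: rest) =
      ' ' :: t ++ (if rest ≠ [] then ' ' :: PySem.Chars.join [' '] rest else []) := by
  unfold pvFmt
  rw [List.findIdx?_cons, if_pos h]
  simp

theorem pvFmt_cons_notmain (t : List Char) (rest : List (List Char)) (h : ¬ pvIsMainA t = true) :
    pvFmt (t :: rest) = t ++ pvFmt rest := by
  unfold pvFmt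
  rw [List.findIdx?_cons, if_neg h]
  cases hf : rest.findIdx? pvIsMainA with
  | none => simp
  | some j => simp [List.append_assoc]

theorem pvFoldB_char (ts : List (List Char)) (hne : ∀ t ∈ ts, t ≠ []) :
    ts.foldr (fun t st => pvStepB st t) ([], []) = (pvFmt ts, PySem.Chars.join [' '] ts) := by
  induction ts with
  | nil => simp [pvFmt, PySem.Chars.join_nil]
  | cons t rest ih =>
    have hner : ∀ u ∈ rest, u ≠ [] := fun u hu => hne u (by simp [hu])
    rw [List.foldr_cons, ih hner]
    have hcond : (PySem.Chars.join [' '] rest ≠ []) = (rest ≠ []) := by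
      simp only [eq_iff_iff]; exact pvJoin_sp_ne rest hner
    have hsp : (t ++ (if rest ≠ [] then ' ' :: PySem.Chars.join [' '] rest else []))
        = PySem.Chars.join [' '] (t :: rest) := by
      cases rest with
      | nil => simp [PySem.Chars.join_singleton]
      | cons b l => rw [if_pos (by simp), PySem.Chars.join_cons_cons]; simp
    unfold pvStepB
    dsimp only
    simp only [hcond]
    rw [hsp]
    by_cases hm : decide (3 ≤ t.length) && !(t.any PySem.Chars.isdigit)
    · rw [if_pos hm, pvFmt_cons_main t rest hm, Prod.mk.injEq]
      exact ⟨by rw [← hsp]; by_cases h : rest = [] <;> simp [h], rfl⟩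
    · rw [if_neg hm, pvFmt_cons_notmain t rest hm]

-- every token produced by str.split() is nonempty
theorem pvGo_ne (s : List Char) (cur : List Char) (acc : List (List Char))
    (hacc : ∀ t ∈ acc, t ≠ []) :
    ∀ t ∈ PySem.Chars.split₀.go s cur acc, t ≠ [] := by
  induction s generalizing cur acc with
  | nil =>
    intro t ht
    unfold PySem.Chars.split₀.go at ht
    split at ht
    · exact hacc t (by simpa using ht)
    · rename_i hcur
      rw [List.mem_reverse, List.mem_cons] at ht
      rcases ht with h1 | h2
      · subst h1; simpa using hcur
      · exact hacc t h2
  | cons a rest ih =>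
    intro t ht
    unfold PySem.Chars.split₀.go at ht
    split at ht
    · split at ht
      · exact ih [] acc hacc t ht
      · rename_i hcur
        refine ih [] (cur.reverse :: acc) ?_ t ht
        intro u hu
        rcases List.mem_cons.mp hu with h1 | h2
        · subst h1; simpa using hcur
        · exact hacc u h2
    · exact ih (a :: cur) acc hacc t ht

theorem pvSplit₀_ne (s : List Char) : ∀ t ∈ PySem.Chars.split₀ s, t ≠ [] := by
  unfold PySem.Chars.split₀
  exact pvGo_ne s [] [] (by simp)

-- B's tail value rewritten through pvFmt
theorem pvB_eq (p : List Char) (ts : List (List Char)) (hne : ∀ t ∈ ts, t ≠ []) :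
    PySem.Chars.strip (p ++ (ts.reverse.foldl pvStepB ([], [])).1) =
    PySem.Chars.strip (p ++ pvFmt ts) := by
  rw [List.foldl_reverse, pvFoldB_char ts hne]

-- ===== VERDICT (by name: the statement is the Claim_ definition above) =====
set_option maxRecDepth 8000 in
theorem format_airspace_name_spec : Claim_equal_format_airspace_name := by
  intro name _
  unfold Spec_format_airspace_name format_airspace_name format_airspace_name_alt
  set parts := PySem.Chars.split₀ name.toList with hparts
  by_cases hp : parts = []
  · simp [hp]
  · rw [if_neg hp, if_neg hp]
    have hne : ∀ t ∈ parts, t ≠ [] := by rw [hparts]; exact pvSplit₀_ne name.toList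
    have hnet : ∀ t ∈ parts.tail, t ≠ [] := fun t ht => hne t (List.mem_of_mem_tail ht)
    by_cases h1 : parts.head! = ['L','F'] ∧ 1 < parts.length ∧ parts[1]! ≠ ['-']
    · rw [if_pos h1, if_pos (Or.inl h1)]
      dsimp only
      rw [pvA_eq [['L','F','-']] parts.tail, pvB_eq ['L','F','-'] parts.tail hnet]
      rfl
    · rw [if_neg h1]
      by_cases h2 : parts.head! = ['L','F','-']
      · rw [if_pos h2, if_pos (Or.inr h2)]
        dsimp only
        rw [pvA_eq [['L','F','-']] parts.tail, pvB_eq ['L','F','-'] parts.tail hnet]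
        rfl
      · rw [if_neg h2, if_neg (by tauto)]
        dsimp only
        rw [pvA_eq [] parts, pvB_eq [] parts hne]
        rfl
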